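-- pv_equiv track=rewrite | github.com/Pistoia-Alliance-Inc/FAIR-COE | scripts/generate_site_config.py | detect_redirect_loops
-- ===== SOURCE A (Python) =====
-- def detect_redirect_loops(redirects):
--     for start in redirects:
--         seen = set()
--         cur = start
--
--         while cur in redirects:
--             if cur in seen:
--                 return True, start
--
--             seen.add(cur)
--             cur = redirects[cur]
--
--     return False, None
-- ===== SOURCE B (Python) =====
-- def detect_redirect_loops(redirects):
--     # status[node] = True iff the chain starting at node eventually revisits a node
--     status = {}
--     for node in redirects:
--         if node in status:
--             continue
--         path = []
--         on_path = set()
--         cur = node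
--         while cur in redirects and cur not in status and cur not in on_path:
--             path.append(cur)
--             on_path.add(cur)
--             cur = redirects[cur]
--         verdict = True if cur in on_path else status.get(cur, False)
--         for p in path:
--             status[p] = verdict
--     for start in redirects:
--         if status[start]:
--             return True, start
--     return False, None
-- ===== Notes on version B (the rewrite author's own statement) =====
-- stated objective: alternative
-- what changed: Replaces A's per-start fresh walk with a seen-set by a single memoized functional-graph pass that marks every node once with whether its chain reaches a cycle, then scans the keys in order for the first marked start.
import Mathlib
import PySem

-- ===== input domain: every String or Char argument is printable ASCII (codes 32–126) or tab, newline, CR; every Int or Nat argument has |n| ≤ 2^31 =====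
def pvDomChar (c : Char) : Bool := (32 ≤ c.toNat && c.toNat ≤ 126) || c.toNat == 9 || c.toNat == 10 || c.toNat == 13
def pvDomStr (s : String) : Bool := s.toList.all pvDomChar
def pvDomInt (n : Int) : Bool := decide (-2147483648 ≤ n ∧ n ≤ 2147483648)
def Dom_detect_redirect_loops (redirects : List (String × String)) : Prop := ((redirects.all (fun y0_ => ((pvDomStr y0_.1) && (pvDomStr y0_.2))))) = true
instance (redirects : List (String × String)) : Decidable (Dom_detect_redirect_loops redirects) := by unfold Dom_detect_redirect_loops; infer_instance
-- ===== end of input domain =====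

-- B replaces A's per-start seen-set walks by one memoized pass marking each node
-- once with whether its redirect chain reaches a cycle (objective: alternative).


-- ===== PORT A =====
-- measure lemmas the well-founded recursions cite
theorem pvFilterLenLt {α : Type} (l : List α) (p q : α → Bool)
    (himp : ∀ x, q x = true → p x = true) (x : α) (hx : x ∈ l)
    (hpx : p x = true) (hqx : q x = false) :
    (l.filter q).length < (l.filter p).length := by
  induction l with
  | nil => cases hx
  | cons a l ih =>
    have hle : (l.filter q).length ≤ (l.filter p).length := by
      rw [← List.countP_eq_length_filter, ← List.countP_eq_length_filter]
      exact List.countP_mono_left (fun x _ => himp x)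
    rcases List.mem_cons.mp hx with rfl | hx'
    · simp only [List.filter_cons, hqx, hpx, if_true]
      exact Nat.lt_succ_of_le hle
    · cases hq : q a <;> cases hp : p a <;>
        simp only [List.filter_cons, hq, hp, if_true, List.length_cons]
      · exact ih hx'
      · exact Nat.lt_succ_of_lt (ih hx')
      · exact absurd (himp a hq) (by simp [hp])
      · exact Nat.succ_lt_succ (ih hx')

theorem pvContainsAdd {s : PySem.Set String} {x y : String}
    (h : PySem.Set.contains s y = true) :
    PySem.Set.contains (PySem.Set.add s x) y = true :=
  (PySem.Set.contains_iff _ _).mpr (by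
    rw [PySem.Set.mem_add]; exact Or.inl ((PySem.Set.contains_iff _ _).mp h))

theorem pvMemKeysOfGetSome {d : PySem.Dict String String} {k v : String}
    (h : d.get? k = some v) : k ∈ PySem.Dict.keys d := by
  by_contra hmem
  rw [(PySem.Dict.get?_eq_none_iff_not_mem_keys _ _).mpr hmem] at h
  cases h

-- A's inner 'while cur in redirects' loop, carrying the seen set
def walkA (d : PySem.Dict String String) (seen : PySem.Set String) (cur : String) : Bool :=
  match h : d.get? cur with
  | none => false
  | some nxt =>
    if PySem.Set.contains seen cur then true
    else walkA d (PySem.Set.add seen cur) nxt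
termination_by ((PySem.Dict.keys d).filter (fun k => !(PySem.Set.contains seen k))).length
decreasing_by
  rename_i hnc
  refine pvFilterLenLt _ _ _ ?_ cur (pvMemKeysOfGetSome h) ?_ ?_
  · intro x hx
    simp only [Bool.not_eq_true'] at hx ⊢
    cases hc : PySem.Set.contains seen x
    · rfl
    · have h2 := @pvContainsAdd seen cur x hc
      rw [hx] at h2; cases h2
  · simp only [Bool.not_eq_true']
    exact Bool.eq_false_iff.mpr hnc
  · simp

-- A's outer 'for start in redirects' loop
def loopA (d : PySem.Dict String String) : List String → Bool × Option String
  | [] => (false, none)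
  | k :: ks => if walkA d PySem.Set.empty k then (true, some k) else loopA d ks

def detect_redirect_loops (redirects : List (String × String)) : Bool × Option String :=
  let d : PySem.Dict String String := PySem.Dict.mk redirects
  loopA d (PySem.Dict.keys d)

-- ===== PORT B =====
-- 'verdict = True if cur in on_path else status.get(cur, False)'
def exitVerdict (status : PySem.Dict String Bool) (onPath : PySem.Set String) (cur : String) : Bool :=
  if PySem.Set.contains onPath cur then true else status.getD cur false

-- B's inner walk: collect the unresolved path until the chain exits, hits a
-- memoized node, or closes on the current path; return (path, verdict)
def walkB (d : PySem.Dict String String) (status : PySem.Dict String Bool)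
    (path : List String) (onPath : PySem.Set String) (cur : String) : List String × Bool :=
  match h : d.get? cur with
  | some nxt =>
    if status.contains cur || PySem.Set.contains onPath cur then
      (path, exitVerdict status onPath cur)
    else
      walkB d status (path ++ [cur]) (PySem.Set.add onPath cur) nxt
  | none => (path, exitVerdict status onPath cur)
termination_by ((PySem.Dict.keys d).filter (fun k => !(status.contains k) && !(PySem.Set.contains onPath k))).length
decreasing_by
  rename_i hcond
  simp only [Bool.or_eq_true, not_or, Bool.not_eq_true] at hcond
  refine pvFilterLenLt _ _ _ ?_ cur (pvMemKeysOfGetSome h) ?_ ?_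
  · intro x hx
    simp only [Bool.and_eq_true, Bool.not_eq_true'] at hx ⊢
    refine ⟨hx.1, ?_⟩
    cases hc : PySem.Set.contains onPath x
    · rfl
    · have h2 := @pvContainsAdd onPath cur x hc
      rw [hx.2] at h2; cases h2
  · have hno : cur ∉ onPath := fun hm => by
      have h3 := (PySem.Set.contains_iff onPath cur).mpr hm
      rw [hcond.2] at h3; cases h3
    simp [hcond.1, hno]
  · simp

-- B's first 'for node in redirects' loop, building the memo
def runB (d : PySem.Dict String String) : List String → PySem.Dict String Bool → PySem.Dict String Bool
  | [], status => status
  | k :: ks, status =>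
    if status.contains k then runB d ks status
    else
      let r := walkB d status [] PySem.Set.empty k
      runB d ks (r.1.foldl (fun s p => s.insert p r.2) status)

-- B's second loop: first start whose memoized verdict is True
def findB (status : PySem.Dict String Bool) : List String → Bool × Option String
  | [] => (false, none)
  | k :: ks => if status.getD k false then (true, some k) else findB status ks

def detect_redirect_loops_alt (redirects : List (String × String)) : Bool × Option String :=
  let d : PySem.Dict String String := PySem.Dict.mk redirects
  findB (runB d (PySem.Dict.keys d) PySem.Dict.empty) (PySem.Dict.keys d)

-- ===== PRECONDITION & SPEC =====
def Spec_detect_redirect_loops (redirects : List (String × String)) (out : Bool × Option String) : Prop := out = detect_redirect_loops_alt redirects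
instance (redirects : List (String × String)) (out : Bool × Option String) : Decidable (Spec_detect_redirect_loops redirects out) := by unfold Spec_detect_redirect_loops; infer_instance

-- ===== CLAIM (what is proved, stated in full; the proofs are below) =====
def Claim_equal_detect_redirect_loops : Prop := ∀ (redirects : List (String × String)), Dom_detect_redirect_loops redirects → Spec_detect_redirect_loops redirects (detect_redirect_loops redirects)

-- ===== LEMMAS AND PROOFS =====

-- the n-step iterate of the redirect map (none once the chain has left the keys)
def chain (d : PySem.Dict String String) : Nat → String → Option String
  | 0, k => some k
  | n+1, k => match d.get? k with | none => none | some k' => chain d n k'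

-- 'the chain from k never leaves the keys', i.e. it eventually revisits a node
def Loops (d : PySem.Dict String String) (k : String) : Prop := ∀ n, (chain d n k).isSome

theorem pvNotMemOfContainsFalse {s : PySem.Set String} {x : String}
    (h : PySem.Set.contains s x = false) : x ∉ s := fun hm => by
  rw [(PySem.Set.contains_iff s x).mpr hm] at h
  exact Bool.noConfusion h

theorem chain_succ (d : PySem.Dict String String) (n : Nat) (k k' : String)
    (h : d.get? k = some k') : chain d (n+1) k = chain d n k' := by
  simp [chain, h]

theorem chain_one (d : PySem.Dict String String) (k : String) :
    chain d 1 k = d.get? k := by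
  cases hk : d.get? k <;> simp [chain, hk]

theorem chain_add (d : PySem.Dict String String) (a b : Nat) (k : String) :
    chain d (a + b) k = (chain d a k).bind (chain d b) := by
  induction a generalizing k with
  | zero => simp [chain]
  | succ a ih =>
    have hb : a + 1 + b = (a + b) + 1 := by omega
    rw [hb]
    cases hk : d.get? k with
    | none => simp [chain, hk]
    | some k' => simp [chain, hk, ih]

theorem chain_succ_right (d : PySem.Dict String String) (n : Nat) (k : String) :
    chain d (n+1) k = (chain d n k).bind d.get? := by
  rw [chain_add d n 1 k]
  cases chain d n k with
  | none => rfl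
  | some x => simp [chain_one]

theorem isSome_chain_mono (d : PySem.Dict String String) (a b : Nat) (k : String)
    (hab : a ≤ b) (h : (chain d b k).isSome) : (chain d a k).isSome := by
  have hb : b = a + (b - a) := by omega
  rw [hb, chain_add] at h
  cases hc : chain d a k
  · rw [hc] at h; simp at h
  · rfl

theorem not_loops_of_none (d : PySem.Dict String String) (k : String)
    (h : d.get? k = none) : ¬ Loops d k := by
  intro hL
  have h1 := hL 1
  rw [chain_one, h] at h1
  cases h1

theorem loops_edge (d : PySem.Dict String String) (k k' : String)
    (h : d.get? k = some k') : Loops d k ↔ Loops d k' := by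
  constructor
  · intro hL n
    have := hL (n+1)
    rwa [chain_succ d n k k' h] at this
  · intro hL n
    cases n with
    | zero => simp [chain]
    | succ n => rw [chain_succ d n k k' h]; exact hL n

theorem loops_of_cycle (d : PySem.Dict String String) (r : Nat) (k : String)
    (hr : 1 ≤ r) (h : chain d r k = some k) : Loops d k := by
  intro n
  induction n using Nat.strong_induction_on with
  | _ n ih =>
    by_cases hn : n ≤ r
    · exact isSome_chain_mono d n r k hn (by rw [h]; rfl)
    · have hsplit : n = r + (n - r) := by omega
      rw [hsplit, chain_add, h]
      simpa using ih (n - r) (by omega)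

theorem loops_reach (d : PySem.Dict String String) (r : Nat) (s c : String)
    (h : chain d r s = some c) : Loops d s ↔ Loops d c := by
  induction r generalizing s with
  | zero =>
    simp only [chain] at h
    rw [Option.some.injEq] at h
    rw [h]
  | succ r ih =>
    cases hk : d.get? s with
    | none => simp only [chain, hk] at h; exact absurd h (by simp)
    | some s' =>
      rw [chain_succ d r s s' hk] at h
      exact (loops_edge d s s' hk).trans (ih s' h)

-- A's inner loop decides Loops
theorem walkA_iff (d : PySem.Dict String String) (seen : PySem.Set String) (cur : String)
    (hinv : ∀ s ∈ seen, ∃ r, 1 ≤ r ∧ chain d r s = some cur) :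
    (walkA d seen cur = true ↔ Loops d cur) := by
  revert hinv
  fun_induction walkA d seen cur with
  | case1 seen cur h =>
    intro hinv
    simp only [Bool.false_eq_true, false_iff]
    exact not_loops_of_none d cur h
  | case2 seen cur nxt h hc =>
    intro hinv
    obtain ⟨r, hr, hcr⟩ := hinv cur ((PySem.Set.contains_iff _ _).mp hc)
    simp only [true_iff]
    exact loops_of_cycle d r cur hr hcr
  | case3 seen cur nxt h hc ih =>
    intro hinv
    have hinv' : ∀ s ∈ PySem.Set.add seen cur, ∃ r, 1 ≤ r ∧ chain d r s = some nxt := by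
      intro s hs
      rw [PySem.Set.mem_add] at hs
      rcases hs with hs | rfl
      · obtain ⟨r, hr, hcr⟩ := hinv s hs
        exact ⟨r + 1, by omega, by rw [chain_succ_right, hcr]; simpa using h⟩
      · exact ⟨1, le_refl 1, by rw [chain_one]; exact h⟩
    exact (ih hinv').trans (loops_edge d cur nxt h).symm

-- walkB only appends to the path
theorem walkB_path_prefix (d : PySem.Dict String String) (status : PySem.Dict String Bool)
    (path : List String) (onPath : PySem.Set String) (cur : String) :
    ∃ ext, (walkB d status path onPath cur).1 = path ++ ext := by
  fun_induction walkB d status path onPath cur with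
  | case1 => exact ⟨[], by simp⟩
  | case2 path onPath cur nxt h hc ih =>
    obtain ⟨ext, hext⟩ := ih
    exact ⟨[cur] ++ ext, by rw [hext]; simp⟩
  | case3 => exact ⟨[], by simp⟩

-- B's inner walk: its verdict decides Loops for every node of the returned path
theorem walkB_spec (d : PySem.Dict String String) (status : PySem.Dict String Bool)
    (path : List String) (onPath : PySem.Set String) (cur : String)
    (hS : ∀ k b, status.get? k = some b → (b = true ↔ Loops d k))
    (hP : ∀ p ∈ path, ((∃ r, 1 ≤ r ∧ chain d r p = some cur) ∧ status.get? p = none))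
    (hPO : onPath = path) :
    ∀ p ∈ (walkB d status path onPath cur).1,
      ((walkB d status path onPath cur).2 = true ↔ Loops d p) := by
  revert hP hPO
  fun_induction walkB d status path onPath cur with
  | case1 path onPath cur nxt h hc =>
    intro hP hPO p hp
    simp only
    by_cases hcp : PySem.Set.contains onPath cur = true
    · -- the chain closed on the current path: everything on it loops
      have hcur : cur ∈ path := hPO ▸ (PySem.Set.contains_iff _ _).mp hcp
      obtain ⟨⟨r, hr, hcr⟩, _⟩ := hP cur hcur
      have hLcur : Loops d cur := loops_of_cycle d r cur hr hcr
      obtain ⟨⟨rp, _, hcp'⟩, _⟩ := hP p hp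
      rw [exitVerdict, if_pos hcp]
      simp only [true_iff]
      exact (loops_reach d rp p cur hcp').mpr hLcur
    · -- hit a memoized node: propagate its verdict
      have hsc : status.contains cur = true := by
        rcases Bool.or_eq_true_iff.mp hc with h1 | h1
        · exact h1
        · exact absurd h1 hcp
      rw [PySem.Dict.contains_eq_isSome_get?] at hsc
      obtain ⟨b, hb⟩ := Option.isSome_iff_exists.mp hsc
      rw [exitVerdict, if_neg hcp, PySem.Dict.getD_of_get?_eq_some status false hb]
      obtain ⟨⟨rp, _, hcp'⟩, _⟩ := hP p hp
      exact (hS cur b hb).trans (loops_reach d rp p cur hcp').symm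
  | case2 path onPath cur nxt h hc ih =>
    intro hP hPO
    have hc' := hc
    simp only [Bool.or_eq_true, not_or, Bool.not_eq_true] at hc'
    have hnc : status.contains cur = false ∧ PySem.Set.contains onPath cur = false := hc'
    refine ih ?_ ?_
    · intro p hp
      rcases List.mem_append.mp hp with hp' | hp'
      · obtain ⟨⟨r, hr, hcr⟩, hst⟩ := hP p hp'
        refine ⟨⟨r + 1, by omega, ?_⟩, hst⟩
        rw [chain_succ_right, hcr]
        simpa using h
      · rw [List.mem_singleton] at hp'
        subst hp'
        refine ⟨⟨1, le_refl 1, by rw [chain_one]; exact h⟩, ?_⟩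
        rw [PySem.Dict.get?_eq_none_iff_contains, hnc.1]
    · have : cur ∉ onPath := fun hm => by
        have h3 := (PySem.Set.contains_iff onPath cur).mpr hm
        rw [hnc.2] at h3; cases h3
      rw [PySem.Set.add_of_not_mem this, hPO]
  | case3 path onPath cur h =>
    intro hP hPO p hp
    have hcp : PySem.Set.contains onPath cur = false := by
      cases hh : PySem.Set.contains onPath cur
      · rfl
      · obtain ⟨⟨r, hr, hcr⟩, _⟩ := hP cur (hPO ▸ (PySem.Set.contains_iff _ _).mp hh)
        obtain ⟨r', rfl⟩ : ∃ r', r = r' + 1 := ⟨r - 1, by omega⟩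
        simp only [chain, h] at hcr
        exact absurd hcr (by simp)
    simp only
    rw [exitVerdict, if_neg (by simp [pvNotMemOfContainsFalse hcp])]
    obtain ⟨⟨rp, _, hcp'⟩, _⟩ := hP p hp
    cases hb : status.get? cur with
    | some b =>
      rw [PySem.Dict.getD_of_get?_eq_some status false hb]
      exact (hS cur b hb).trans (loops_reach d rp p cur hcp').symm
    | none =>
      rw [PySem.Dict.getD_eq_get?_getD, hb]
      simp only [Option.getD_none, Bool.false_eq_true, false_iff]
      intro hLp
      exact not_loops_of_none d cur h ((loops_reach d rp p cur hcp').mp hLp)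

-- updating the memo with one walk's path
theorem get?_foldl_insert (st : PySem.Dict String Bool) (v : Bool) (l : List String) (x : String) :
    (l.foldl (fun s p => s.insert p v) st).get? x
      = if x ∈ l then some v else st.get? x := by
  induction l generalizing st with
  | nil => simp
  | cons p ps ih =>
    simp only [List.foldl_cons, ih, PySem.Dict.get?_insert, List.mem_cons]
    by_cases h1 : x ∈ ps <;> by_cases h2 : x = p <;> simp [h1, h2]

-- B's memo-building loop: memo stays correct, grows, and covers the processed keys
theorem runB_spec (d : PySem.Dict String String) (ks : List String) (status : PySem.Dict String Bool)
    (hS : ∀ k b, status.get? k = some b → (b = true ↔ Loops d k))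
    (hks : ∀ k ∈ ks, (d.get? k).isSome) :
    (∀ k b, (runB d ks status).get? k = some b → (b = true ↔ Loops d k)) ∧
    (∀ k, status.contains k = true → (runB d ks status).contains k = true) ∧
    (∀ k ∈ ks, (runB d ks status).contains k = true) := by
  induction ks generalizing status with
  | nil => exact ⟨hS, fun k h => h, fun k h => absurd h (List.not_mem_nil)⟩
  | cons k ks ih =>
    by_cases hck : status.contains k = true
    · have h1 := ih status hS (fun x hx => hks x (List.mem_cons_of_mem k hx))
      rw [runB, if_pos hck]
      refine ⟨h1.1, h1.2.1, ?_⟩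
      intro x hx
      rcases List.mem_cons.mp hx with rfl | hx'
      · exact h1.2.1 x hck
      · exact h1.2.2 x hx'
    · obtain ⟨nxt, hnxt⟩ := Option.isSome_iff_exists.mp (hks k (List.mem_cons_self))
      have hwb := walkB_spec d status [] PySem.Set.empty k hS
        (fun p hp => absurd hp (List.not_mem_nil)) rfl
      set r := walkB d status [] PySem.Set.empty k with hr
      have hS' : ∀ x b, (r.1.foldl (fun s p => s.insert p r.2) status).get? x = some b →
          (b = true ↔ Loops d x) := by
        intro x b hxb
        rw [get?_foldl_insert] at hxb
        by_cases hm : x ∈ r.1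
        · rw [if_pos hm, Option.some.injEq] at hxb
          rw [← hxb]
          exact hwb x hm
        · rw [if_neg hm] at hxb
          exact hS x b hxb
      have h1 := ih _ hS' (fun x hx => hks x (List.mem_cons_of_mem k hx))
      have hmono : ∀ x, status.contains x = true →
          (r.1.foldl (fun s p => s.insert p r.2) status).contains x = true := by
        intro x hx
        rw [PySem.Dict.contains_eq_isSome_get?, get?_foldl_insert]
        by_cases hm : x ∈ r.1
        · rw [if_pos hm]; rfl
        · rw [if_neg hm, ← PySem.Dict.contains_eq_isSome_get?]; exact hx
      have hckf : status.contains k = false := Bool.eq_false_iff.mpr hck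
      have hkmem : k ∈ r.1 := by
        rw [hr, walkB]
        split
        · rename_i nxt' hnxt'
          rw [if_neg (by simp [hckf])]
          obtain ⟨ext, hext⟩ :=
            walkB_path_prefix d status ([] ++ [k]) (PySem.Set.add PySem.Set.empty k) nxt'
          rw [hext]
          simp
        · rename_i hnone
          rw [hnxt] at hnone; cases hnone
      have hkc : (r.1.foldl (fun s p => s.insert p r.2) status).contains k = true := by
        rw [PySem.Dict.contains_eq_isSome_get?, get?_foldl_insert, if_pos hkmem]; rfl
      rw [runB, if_neg (by simp [hck])]
      refine ⟨h1.1, fun x hx => h1.2.1 x (hmono x hx), ?_⟩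
      intro x hx
      rcases List.mem_cons.mp hx with rfl | hx'
      · exact h1.2.1 x hkc
      · exact h1.2.2 x hx'

theorem getD_final (d : PySem.Dict String String) (k : String)
    (hk : (d.get? k).isSome) :
    (runB d (PySem.Dict.keys d) PySem.Dict.empty).getD k false = walkA d PySem.Set.empty k := by
  have hks : ∀ x ∈ PySem.Dict.keys d, (d.get? x).isSome := by
    intro x hx
    rw [← PySem.Dict.contains_eq_isSome_get?]
    exact (PySem.Dict.contains_iff_mem_keys _ _).mpr hx
  have hrun := runB_spec d (PySem.Dict.keys d) PySem.Dict.empty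
    (fun x b hb => by rw [PySem.Dict.get?_empty] at hb; cases hb) hks
  obtain ⟨v, hv⟩ := Option.isSome_iff_exists.mp hk
  have hcov := hrun.2.2 k (pvMemKeysOfGetSome hv)
  rw [PySem.Dict.contains_eq_isSome_get?] at hcov
  obtain ⟨b, hb⟩ := Option.isSome_iff_exists.mp hcov
  have hbL := hrun.1 k b hb
  have hwA := walkA_iff d PySem.Set.empty k (fun s hs => absurd hs (List.not_mem_nil))
  rw [PySem.Dict.getD_of_get?_eq_some _ false hb]
  exact Bool.eq_iff_iff.mpr (hbL.trans hwA.symm)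

theorem loopA_eq_findB (d : PySem.Dict String String) (ks : List String)
    (hks : ∀ k ∈ ks, (d.get? k).isSome) :
    loopA d ks = findB (runB d (PySem.Dict.keys d) PySem.Dict.empty) ks := by
  induction ks with
  | nil => rfl
  | cons k ks ih =>
    rw [loopA, findB, getD_final d k (hks k (List.mem_cons_self))]
    by_cases hw : walkA d PySem.Set.empty k = true
    · rw [if_pos hw, if_pos hw]
    · rw [if_neg hw, if_neg hw]
      exact ih (fun x hx => hks x (List.mem_cons_of_mem k hx))

-- ===== VERDICT (by name: the statement is the Claim_ definition above) =====
theorem detect_redirect_loops_spec : Claim_equal_detect_redirect_loops := by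
  intro redirects _
  unfold Spec_detect_redirect_loops detect_redirect_loops detect_redirect_loops_alt
  exact loopA_eq_findB _ _ (fun k hk => by
    simpa [PySem.Dict.contains_eq_isSome_get?] using
      (PySem.Dict.contains_iff_mem_keys _ _).mpr hk)
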